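-- pv_equiv track=rewrite | github.com/MrBrantCode/unitest_baseline | mut_generate/mist_train_cf/cf_70586/solution.py | find_sole_entities
-- ===== SOURCE A (Python) =====
-- def find_sole_entities(nums):
--     freq = dict()
--     for num in nums:
--         if num in freq:
--             freq[num] += 1
--         else:
--             freq[num] = 1
--     sole_entities = [num for num, count in freq.items() if count == 1]
--     sole_entities.sort(reverse=True)
--     return sole_entities
-- ===== SOURCE B (Python) =====
-- def find_sole_entities(nums):
--     s = sorted(nums, reverse=True)
--     res = []
--     n = len(s)
--     i = 0
--     while i < n:
--         x = s[i]
--         k = 0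
--         while i + 1 + k < n and s[i + 1 + k] == x:
--             k += 1
--         if k == 0:
--             res.append(x)
--         i = i + 1 + k
--     return res
-- ===== Notes on version B (the rewrite author's own statement) =====
-- stated objective: alternative
-- what changed: Replaced the frequency dictionary with a sort-then-run-length scan: sort a copy of nums descending once and collect in one pass the elements whose run has length exactly 1, which yields the result already in descending order.
import Mathlib
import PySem

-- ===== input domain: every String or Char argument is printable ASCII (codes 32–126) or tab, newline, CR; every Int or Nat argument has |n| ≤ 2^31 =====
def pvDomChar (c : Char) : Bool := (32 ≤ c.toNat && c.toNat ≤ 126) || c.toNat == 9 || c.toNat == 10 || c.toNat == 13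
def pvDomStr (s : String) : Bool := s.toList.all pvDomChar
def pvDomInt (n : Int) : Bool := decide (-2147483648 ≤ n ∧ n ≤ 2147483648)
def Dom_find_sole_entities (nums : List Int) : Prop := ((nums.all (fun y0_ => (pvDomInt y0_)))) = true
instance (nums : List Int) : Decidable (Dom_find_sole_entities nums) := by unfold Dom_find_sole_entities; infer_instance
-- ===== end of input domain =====

-- B replaces A's frequency dictionary by a sort-then-run-length scan (alternative decomposition, similar cost).

-- ===== PORT A =====
def find_sole_entities (nums : List Int) : List Int :=
  let freq : PySem.Dict Int Int := nums.foldl (fun d num =>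
    if d.contains num then d.insert num (d.getD num 0 + 1)
    else d.insert num 1) PySem.Dict.empty
  let sole_entities := (freq.items.filter (fun p => p.2 == 1)).map (fun p => p.1)
  PySem.List.sorted sole_entities (fun x => x) true

-- ===== PORT B =====
-- Source B's index loop over s (x = s[i]; k = run length after i; i = i+1+k) as recursion on the
-- suffix s.drop i: head = s[i], k = length of the run of copies, recurse on the next suffix
def runScan : List Int → List Int
  | [] => []
  | x :: rest =>
    let k := (rest.takeWhile (fun y => y == x)).length
    (if k == 0 then [x] else []) ++ runScan (rest.drop k)
termination_by s => s.length
decreasing_by simp only [List.length_drop, List.length_cons]; omega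

def find_sole_entities_alt (nums : List Int) : List Int :=
  runScan (PySem.List.sorted nums (fun x => x) true)

-- ===== PRECONDITION & SPEC =====
def Spec_find_sole_entities (nums : List Int) (out : List Int) : Prop := out = find_sole_entities_alt nums
instance (nums : List Int) (out : List Int) : Decidable (Spec_find_sole_entities nums out) := by unfold Spec_find_sole_entities; infer_instance

-- ===== CLAIM (what is proved, stated in full; the proofs are below) =====
def Claim_equal_find_sole_entities : Prop := ∀ (nums : List Int), Dom_find_sole_entities nums → Spec_find_sole_entities nums (find_sole_entities nums)

-- ===== LEMMAS AND PROOFS =====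

-- every element of the rest after dropping the leading run of x is strictly below x (list descending-sorted)
theorem dropRun_lt (x : Int) (rest : List Int)
    (hp : rest.Pairwise (fun a b => b ≤ a)) (hle : ∀ y ∈ rest, y ≤ x) :
    ∀ y ∈ rest.dropWhile (fun y => y == x), y < x := by
  induction rest with
  | nil => simp
  | cons a t ih =>
    by_cases ha : a = x
    · rw [List.dropWhile_cons, if_pos (beq_iff_eq.mpr ha)]
      exact ih (List.Pairwise.sublist (List.sublist_cons_self a t) hp)
        (fun y hy => hle y (List.mem_cons_of_mem a hy))
    · have hax : a < x := lt_of_le_of_ne (hle a (List.mem_cons_self)) ha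
      intro y hy
      rw [List.dropWhile_cons, if_neg (by simp [ha])] at hy
      simp only [List.mem_cons] at hy
      rcases hy with rfl | hy
      · exact hax
      · exact lt_of_le_of_lt ((List.pairwise_cons.mp hp).1 y hy) hax

theorem runScan_spec : ∀ (n : Nat) (s : List Int), s.length ≤ n →
    s.Pairwise (fun a b => b ≤ a) →
    (runScan s).Pairwise (fun a b => b < a) ∧ ∀ x, (x ∈ runScan s ↔ s.count x = 1) := by
  intro n
  induction n with
  | zero =>
    intro s hlen _
    have hnil : s = [] := List.eq_nil_of_length_eq_zero (by omega)
    subst hnil; simp [runScan]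
  | succ n ih =>
    intro s hlen hs
    match s with
    | [] => simp [runScan]
    | x :: rest =>
      set k := (rest.takeWhile (fun y => y == x)).length with hk
      have hcons := List.pairwise_cons.mp hs
      have hrest : rest.Pairwise (fun a b => b ≤ a) := hcons.2
      have hdrop_lt : ∀ y ∈ rest.dropWhile (fun y => y == x), y < x :=
        dropRun_lt x rest hrest hcons.1
      have hdk : rest.drop k = rest.dropWhile (fun y => y == x) := by
        conv_lhs => rw [show rest = rest.takeWhile (fun y => y == x)
          ++ rest.dropWhile (fun y => y == x) from (List.takeWhile_append_dropWhile).symm]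
        rw [hk, List.drop_left]
      have hrest' : (rest.drop k).Pairwise (fun a b => b ≤ a) :=
        List.Pairwise.sublist (List.drop_sublist k rest) hrest
      have hlen' : (rest.drop k).length ≤ n := by
        simp only [List.length_cons] at hlen
        simp only [List.length_drop]; omega
      obtain ⟨ihp, ihm⟩ := ih (rest.drop k) hlen' hrest'
      have hres : runScan (x :: rest) = (if k == 0 then [x] else []) ++ runScan (rest.drop k) := by
        rw [runScan]
      -- counts
      have hrun_all : ∀ y ∈ rest.takeWhile (fun y => y == x), y = x := by
        intro y hy
        simpa using List.mem_takeWhile_imp hy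
      have hxdrop : x ∉ rest.drop k := by
        rw [hdk]; intro hx; exact absurd (hdrop_lt x hx) (lt_irrefl x)
      have hsplit : rest = rest.takeWhile (fun y => y == x) ++ rest.drop k := by
        rw [hdk]; exact (List.takeWhile_append_dropWhile).symm
      have hcount_x : (x :: rest).count x = 1 + k := by
        rw [List.count_cons_self, hsplit, List.count_append]
        have h1 : (rest.takeWhile (fun y => y == x)).count x
            = (rest.takeWhile (fun y => y == x)).length := by
          rw [List.count_eq_length]; intro b hb; exact (hrun_all b hb).symm
        have h2 : (rest.drop k).count x = 0 := List.count_eq_zero.mpr hxdrop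
        omega
      have hcount_ne : ∀ y, y ≠ x → (x :: rest).count y = (rest.drop k).count y := by
        intro y hy
        rw [List.count_cons_of_ne (Ne.symm hy)]
        conv_lhs => rw [hsplit]
        rw [List.count_append]
        have : (rest.takeWhile (fun y => y == x)).count y = 0 := by
          rw [List.count_eq_zero]; intro hmem; exact hy (hrun_all y hmem)
        omega
      have hmem_lt : ∀ y ∈ runScan (rest.drop k), y < x := by
        intro y hy
        have : (rest.drop k).count y = 1 := (ihm y).mp hy
        have hymem : y ∈ rest.drop k := List.count_pos_iff.mp (by omega)
        rw [hdk] at hymem; exact hdrop_lt y hymem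
      by_cases hk0 : k = 0
      · have hres0 : runScan (x :: rest) = x :: runScan (rest.drop k) := by
          rw [hres, hk0]; simp
        constructor
        · rw [hres0]; exact List.pairwise_cons.mpr ⟨fun y hy => hmem_lt y hy, ihp⟩
        · intro y
          rw [hres0, List.mem_cons]
          by_cases hyx : y = x
          · subst hyx
            simp only [true_or, true_iff]
            omega
          · rw [hcount_ne y hyx, ← ihm y]
            simp [hyx]
      · have hres1 : runScan (x :: rest) = runScan (rest.drop k) := by
          rw [hres]; simp [hk0]
        constructor
        · rw [hres1]; exact ihp
        · intro y
          rw [hres1]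
          by_cases hyx : y = x
          · subst hyx
            constructor
            · intro hy; exact absurd (hmem_lt y hy) (lt_irrefl y)
            · intro hc; rw [hcount_x] at hc; omega
          · rw [hcount_ne y hyx, ihm y]

theorem find_sole_entities_eq (nums : List Int) :
    find_sole_entities nums
      = PySem.List.sorted
          ((PySem.Set.ofList nums).filter (fun k => ((nums.count k : Int) == 1)))
          (fun x => x) true := by
  have hfold := PySem.List.foldl_congr_mem (l := nums)
      (init := (PySem.Dict.empty : PySem.Dict Int Int))
      (f := fun d num => if d.contains num = true then d.insert num (d.getD num 0 + 1)
        else d.insert num 1)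
      (g := fun d x => d.insert x (d.getD x 0 + 1))
      (by
        intro acc x _
        by_cases hc : acc.contains x = true
        · simp [hc]
        · have hc' : acc.contains x = false := by simpa using hc
          simp [hc', PySem.Dict.getD_of_not_contains])
  unfold find_sole_entities
  dsimp only
  rw [hfold, PySem.Dict.foldl_insert_getD_add_one_eq_counter, PySem.Dict.items_counter]
  congr 1
  rw [List.filter_map, List.map_map]
  simp only [Function.comp_def]
  simp

theorem find_sole_entities_spec_aux (nums : List Int) :
    find_sole_entities nums = find_sole_entities_alt nums := by
  rw [find_sole_entities_eq]
  unfold find_sole_entities_alt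
  set s := PySem.List.sorted nums (fun x => x) true with hsdef
  have hsp : s.Pairwise (fun a b => b ≤ a) := by
    simpa using PySem.List.sorted_pairwise_rev (xs := nums) (key := fun x => x)
  obtain ⟨hpw, hmem⟩ := runScan_spec s.length s le_rfl hsp
  have hperm : (runScan s).Perm
      ((PySem.Set.ofList nums).filter (fun k => ((nums.count k : Int) == 1))) := by
    have hnd1 : (runScan s).Nodup := hpw.imp (fun h => ne_of_gt h)
    have hnd2 : ((PySem.Set.ofList nums).filter
        (fun k => ((nums.count k : Int) == 1))).Nodup :=
      (PySem.Set.nodup_ofList nums).filter _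
    rw [List.perm_ext_iff_of_nodup hnd1 hnd2]
    intro y
    have hcnt : s.count y = nums.count y :=
      (PySem.List.sorted_perm (xs := nums) (key := fun x => x) (rev := true)).count_eq y
    rw [hmem y, hcnt, List.mem_filter, PySem.Set.mem_ofList]
    constructor
    · intro h1
      refine ⟨List.count_pos_iff.mp (by omega), by simp [h1]⟩
    · rintro ⟨-, h2⟩
      have : (nums.count y : Int) = 1 := by simpa using h2
      exact_mod_cast this
  exact PySem.List.sorted_rev_eq_of_perm_of_pairwise_gt _ _ (fun x => x) hperm (by simpa using hpw)

-- ===== VERDICT (by name: the statement is the Claim_ definition above) =====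
theorem find_sole_entities_spec : Claim_equal_find_sole_entities := by
  intro nums _
  exact find_sole_entities_spec_aux nums
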